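-- pv_equiv track=rewrite | github.com/HaaniTharak/Project-AlanBot | initialCalcs.py | playerUpdate
-- ===== SOURCE A (Python) =====
-- def playerUpdate(playerCards, count, cardsInShoe):
--     playerTotal = sum(playerCards)
--     for i in playerCards:
--         if(i == 10 or i == 11):
--             count = count - 1
--         if(i < 7):
--             count = count + 1
--         cardsInShoe = cardsInShoe - 1
--
--     return(playerTotal,count, cardsInShoe)
-- ===== SOURCE B (Python) =====
-- def playerUpdate(playerCards, count, cardsInShoe):
--     # Histogram-based: tally each distinct card value once, then apply the
--     # count/total adjustments per distinct value weighted by its multiplicity.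
--     hist = {}
--     for c in playerCards:
--         hist[c] = hist.get(c, 0) + 1
--     total = 0
--     drawn = 0
--     for v, occ in hist.items():
--         total += v * occ
--         drawn += occ
--         if v == 10 or v == 11:
--             count -= occ
--         elif v < 7:
--             count += occ
--     return (total, count, cardsInShoe - drawn)
-- ===== Notes on version B (the rewrite author's own statement) =====
-- stated objective: alternative
-- what changed: Replaces A's fused per-card loop with a histogram algorithm: build a dict of multiplicities of the card values, then iterate once over the distinct values, applying each total/count/shoe adjustment weighted by the multiplicity.
import Mathlib
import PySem

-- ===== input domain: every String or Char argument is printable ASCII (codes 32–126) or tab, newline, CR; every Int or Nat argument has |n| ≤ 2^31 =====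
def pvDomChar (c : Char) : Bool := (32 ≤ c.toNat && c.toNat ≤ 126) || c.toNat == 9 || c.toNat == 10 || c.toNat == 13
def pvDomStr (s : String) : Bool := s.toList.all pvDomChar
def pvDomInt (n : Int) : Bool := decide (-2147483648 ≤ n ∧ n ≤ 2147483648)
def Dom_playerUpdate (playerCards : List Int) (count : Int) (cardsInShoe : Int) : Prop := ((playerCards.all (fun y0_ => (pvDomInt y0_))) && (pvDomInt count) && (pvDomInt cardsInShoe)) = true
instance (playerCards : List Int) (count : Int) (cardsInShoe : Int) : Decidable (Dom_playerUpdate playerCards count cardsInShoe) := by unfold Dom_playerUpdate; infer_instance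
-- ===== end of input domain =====

-- B replaces A's fused per-card loop with a histogram algorithm (dict of multiplicities,
-- then one pass over the distinct values weighted by multiplicity); objective: alternative.

-- ===== PORT A =====
-- the fused loop: state is (count, cardsInShoe), updated per card exactly as A's body
def playerUpdate (playerCards : List Int) (count : Int) (cardsInShoe : Int) : Int × Int × Int :=
  let playerTotal := playerCards.foldl (· + ·) 0
  let st := playerCards.foldl
    (fun (st : Int × Int) i =>
      let c := if i = 10 ∨ i = 11 then st.1 - 1 else st.1
      let c := if i < 7 then c + 1 else c
      (c, st.2 - 1))
    (count, cardsInShoe)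
  (playerTotal, st.1, st.2)

-- ===== PORT B =====
-- histogram: hist[c] = hist.get(c, 0) + 1, then one pass over hist.items()
def playerUpdate_alt (playerCards : List Int) (count : Int) (cardsInShoe : Int) : Int × Int × Int :=
  let hist := playerCards.foldl
    (fun (d : PySem.Dict Int Int) c => d.insert c (d.getD c 0 + 1)) PySem.Dict.empty
  let st := hist.items.foldl
    (fun (st : Int × Int × Int) (p : Int × Int) =>
      let total := st.1 + p.1 * p.2
      let drawn := st.2.1 + p.2
      let cnt := if p.1 = 10 ∨ p.1 = 11 then st.2.2 - p.2
                 else if p.1 < 7 then st.2.2 + p.2 else st.2.2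
      (total, drawn, cnt))
    (0, 0, count)
  (st.1, st.2.2, cardsInShoe - st.2.1)

-- ===== PRECONDITION & SPEC =====
def Spec_playerUpdate (playerCards : List Int) (count : Int) (cardsInShoe : Int) (out : Int × Int × Int) : Prop := out = playerUpdate_alt playerCards count cardsInShoe
instance (playerCards : List Int) (count : Int) (cardsInShoe : Int) (out : Int × Int × Int) : Decidable (Spec_playerUpdate playerCards count cardsInShoe out) := by unfold Spec_playerUpdate; infer_instance

-- ===== CLAIM (what is proved, stated in full; the proofs are below) =====
def Claim_equal_playerUpdate : Prop := ∀ (playerCards : List Int) (count : Int) (cardsInShoe : Int), Dom_playerUpdate playerCards count cardsInShoe → Spec_playerUpdate playerCards count cardsInShoe (playerUpdate playerCards count cardsInShoe)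

-- ===== LEMMAS AND PROOFS =====

-- the per-card net effect of A's two if-branches on count (the branches are mutually exclusive)
def pvDelta (v : Int) : Int := if v = 10 ∨ v = 11 then -1 else if v < 7 then 1 else 0

-- A's fused loop in closed form: count gains the sum of deltas, the shoe loses the length
theorem playerUpdate_loop (playerCards : List Int) :
    ∀ (count cardsInShoe : Int),
      playerCards.foldl
        (fun (st : Int × Int) i =>
          let c := if i = 10 ∨ i = 11 then st.1 - 1 else st.1
          let c := if i < 7 then c + 1 else c
          (c, st.2 - 1))
        (count, cardsInShoe)
      = (count + (playerCards.map pvDelta).sum, cardsInShoe - playerCards.length) := by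
  induction playerCards with
  | nil => intro c s; simp
  | cons x xs ih =>
    intro c s
    simp only [List.foldl_cons, List.map_cons, List.sum_cons, List.length_cons, ih]
    refine Prod.ext ?_ ?_
    · generalize (xs.map pvDelta).sum = S
      simp only [pvDelta]
      split_ifs with h1 h2 <;> omega
    · push_cast; ring

-- B's pass over the histogram items in closed form (three additive accumulators)
theorem alt_items_loop (L : List (Int × Int)) :
    ∀ (a b c : Int),
      L.foldl
        (fun (st : Int × Int × Int) (p : Int × Int) =>
          let total := st.1 + p.1 * p.2
          let drawn := st.2.1 + p.2
          let cnt := if p.1 = 10 ∨ p.1 = 11 then st.2.2 - p.2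
                     else if p.1 < 7 then st.2.2 + p.2 else st.2.2
          (total, drawn, cnt))
        (a, b, c)
      = (a + (L.map (fun p => p.1 * p.2)).sum,
         b + (L.map (·.2)).sum,
         c + (L.map (fun p => pvDelta p.1 * p.2)).sum) := by
  induction L with
  | nil => intro a b c; simp
  | cons x xs ih =>
    intro a b c
    simp only [List.foldl_cons, List.map_cons, List.sum_cons, ih]
    refine Prod.ext ?_ (Prod.ext ?_ ?_) <;> simp only [pvDelta] <;> (try split_ifs) <;> ring

-- summing f(v)·multiplicity(v) over the distinct values equals summing f over the list
theorem sum_dedup_mul_count (xs : List Int) (f : Int → Int) :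
    ((PySem.List.dedup xs).map (fun v => f v * (xs.count v : Int))).sum = (xs.map f).sum := by
  have hfin : (PySem.List.dedup xs).toFinset = xs.toFinset := by
    ext a; simp [List.mem_toFinset]
  calc ((PySem.List.dedup xs).map (fun v => f v * (xs.count v : Int))).sum
      = ∑ v ∈ (PySem.List.dedup xs).toFinset, f v * (xs.count v : Int) := by
        rw [List.sum_toFinset _ (PySem.List.nodup_dedup xs)]
    _ = ∑ v ∈ xs.toFinset, f v * (xs.count v : Int) := by rw [hfin]
    _ = (xs.map f).sum := by
        rw [Finset.sum_list_map_count]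
        exact Finset.sum_congr rfl (fun v _ => by rw [nsmul_eq_mul, mul_comm])

-- ===== VERDICT (by name: the statement is the Claim_ definition above) =====
theorem playerUpdate_spec : Claim_equal_playerUpdate := by
  intro pc c s _
  unfold Spec_playerUpdate playerUpdate playerUpdate_alt
  simp only [PySem.Dict.foldl_insert_getD_add_one_eq_counter, PySem.Dict.items_counter,
    ← PySem.List.dedup_eq_ofList, playerUpdate_loop, alt_items_loop, List.map_map,
    Function.comp_def]
  have htot := sum_dedup_mul_count pc (fun v => v)
  have hlen := sum_dedup_mul_count pc (fun _ => 1)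
  have hdel := sum_dedup_mul_count pc pvDelta
  simp only [one_mul] at hlen
  refine Prod.ext ?_ (Prod.ext ?_ ?_) <;> simp only [zero_add]
  · rw [htot]
    simp [List.sum_eq_foldl]
  · rw [hdel]
  · rw [hlen]
    simp
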